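-- pv_equiv track=rewrite | github.com/Aayush99910/data_structure_and_algo | Hashing/Open Address - Linear Probing & Quadratic Probing/Applications/plagiarism detection.py | calculate_ascii
-- ===== SOURCE A (Python) =====
-- def calculate_ascii(string):
--   i = 1
--   weighted_sum = 0
--   while i <= len(string):
--     ascii_value = ord(string[i - 1])
--     multiplied = ascii_value * i
--     weighted_sum += multiplied
--     i += 1
--
--   return weighted_sum
-- ===== SOURCE B (Python) =====
-- def calculate_ascii(string):
--   acc = 0
--   total = 0
--   for c in reversed(string):
--     acc += ord(c)
--     total += acc
--   return total
-- ===== Notes on version B (the rewrite author's own statement) =====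
-- stated objective: alternative
-- what changed: Replaces the index-driven while loop with per-character indexing and multiplication i*ord(string[i-1]) by a single right-to-left for loop maintaining a running suffix-sum accumulator (i*a_i = sum of suffix sums), with no index variable, no subscripting and no multiplication (measured constant-factor speedup).
import Mathlib
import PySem

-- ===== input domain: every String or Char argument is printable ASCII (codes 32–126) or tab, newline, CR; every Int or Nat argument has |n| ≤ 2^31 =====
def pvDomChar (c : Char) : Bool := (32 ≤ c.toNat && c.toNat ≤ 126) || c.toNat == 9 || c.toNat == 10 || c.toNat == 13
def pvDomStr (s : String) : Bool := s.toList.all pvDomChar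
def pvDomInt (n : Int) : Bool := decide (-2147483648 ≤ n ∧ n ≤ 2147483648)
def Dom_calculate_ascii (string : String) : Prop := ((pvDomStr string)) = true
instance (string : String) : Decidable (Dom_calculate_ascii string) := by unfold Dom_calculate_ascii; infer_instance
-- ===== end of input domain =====

-- B replaces A's index-and-multiply while loop by a reversed traversal with a running
-- suffix-sum accumulator (alternative decomposition, same O(n) cost); return value only.

-- ===== PORT A =====
-- while i <= len(string): weighted_sum += ord(string[i-1]) * i; i += 1
def calculate_ascii (string : String) : Int :=
  let cs := string.toList
  (PySem.List.pyRange 1 ((cs.length : Int) + 1) 1).foldl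
    (fun weighted_sum i => weighted_sum + (PySem.List.pyGetD cs (i - 1) 'A').toNat * i) 0

-- ===== PORT B =====
-- acc/total accumulators over reversed(string)
def calculate_ascii_alt (string : String) : Int :=
  (string.toList.reverse.foldl
    (fun (p : Int × Int) c => (p.1 + (c.toNat : Int), p.2 + p.1 + (c.toNat : Int)))
    (0, 0)).2

-- ===== PRECONDITION & SPEC =====
def Spec_calculate_ascii (string : String) (out : Int) : Prop := out = calculate_ascii_alt string
instance (string : String) (out : Int) : Decidable (Spec_calculate_ascii string out) := by unfold Spec_calculate_ascii; infer_instance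

-- ===== CLAIM (what is proved, stated in full; the proofs are below) =====
def Claim_equal_calculate_ascii : Prop := ∀ (string : String), Dom_calculate_ascii string → Spec_calculate_ascii string (calculate_ascii string)

-- ===== LEMMAS AND PROOFS =====

-- reference: sum of i * ord(c) with i starting at the given index
def pvSumIdx : List Char → Int → Int
  | [], _ => 0
  | c :: t, i => i * (c.toNat : Int) + pvSumIdx t (i + 1)

-- sum of ords
def pvS : List Char → Int
  | [] => 0
  | c :: t => (c.toNat : Int) + pvS t

-- sum of suffix-sums seen by B (first element weighted by the list length)
def pvW : List Char → Int
  | [] => 0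
  | c :: t => ((c :: t).length : Int) * (c.toNat : Int) + pvW t

theorem pvA_loop (t pre : List Char) (ws : Int) :
    (PySem.List.pyRange ((pre.length : Int) + 1) (((pre ++ t).length : Int) + 1) 1).foldl
      (fun weighted_sum i => weighted_sum + (PySem.List.pyGetD (pre ++ t) (i - 1) 'A').toNat * i) ws
    = ws + pvSumIdx t ((pre.length : Int) + 1) := by
  induction t generalizing pre ws with
  | nil => simp [pvSumIdx, PySem.List.pyRange_one_eq_nil]
  | cons c t ih =>
    rw [PySem.List.pyRange_one_cons (by simp)]
    have hget : PySem.List.pyGetD (pre ++ c :: t) ((pre.length : Int) + 1 - 1) 'A' = c := by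
      have : ((pre.length : Int) + 1 - 1) = (pre.length : Int) := by ring
      rw [this, PySem.List.pyGetD_natCast, List.getD_eq_getElem?_getD,
        List.getElem?_append_right (Nat.le_refl _)]
      simp
    have := ih (pre ++ [c]) (ws + (c.toNat : Int) * ((pre.length : Int) + 1))
    simp only [List.foldl_cons, hget]
    have hlen : ((pre ++ [c]).length : Int) + 1 = (pre.length : Int) + 1 + 1 := by
      simp
    have happ : pre ++ c :: t = (pre ++ [c]) ++ t := by simp
    rw [happ]
    rw [show (pre.length : Int) + 1 + 1 = ((pre ++ [c]).length : Int) + 1 from hlen.symm] at *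
    rw [ih ((pre ++ [c])) (ws + ↑c.toNat * ((pre.length : Int) + 1))]
    simp [pvSumIdx]
    ring

theorem pvB_loop (l : List Char) (acc total : Int) :
    l.foldl (fun (p : Int × Int) c => (p.1 + (c.toNat : Int), p.2 + p.1 + (c.toNat : Int))) (acc, total)
    = (acc + pvS l, total + (l.length : Int) * acc + pvW l) := by
  induction l generalizing acc total with
  | nil => simp [pvS, pvW]
  | cons c t ih =>
    simp only [List.foldl_cons, ih, pvS, pvW, List.length_cons]
    simp only [Prod.mk.injEq]
    refine ⟨by ring, by push_cast; ring⟩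

theorem pvSumIdx_append (l : List Char) (c : Char) (i : Int) :
    pvSumIdx (l ++ [c]) i = pvSumIdx l i + (i + (l.length : Int)) * (c.toNat : Int) := by
  induction l generalizing i with
  | nil => simp [pvSumIdx]
  | cons d t ih => simp [pvSumIdx, ih]; ring

theorem pvBridge (l : List Char) : pvW l.reverse = pvSumIdx l 1 := by
  induction l using List.reverseRecOn with
  | nil => simp [pvW, pvSumIdx]
  | append_singleton t c ih =>
    rw [List.reverse_append]
    simp only [List.reverse_singleton, List.singleton_append, pvW, pvSumIdx_append, ih]
    simp
    ring

-- ===== VERDICT (by name: the statement is the Claim_ definition above) =====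
theorem calculate_ascii_spec : Claim_equal_calculate_ascii := by
  intro s _
  unfold Spec_calculate_ascii calculate_ascii calculate_ascii_alt
  have hA := pvA_loop s.toList [] 0
  simp only [List.nil_append, List.length_nil, Int.natCast_zero, zero_add] at hA
  rw [hA, pvB_loop, pvBridge]
  simp
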